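-- pv_equiv track=rewrite | github.com/pypi-data/pypi-mirror-398 | packages/vcf-pg-loader/vcf_pg_loader-0.5.4.tar.gz/vcf_pg_loader-0.5.4/tests/vendored/echtvar/generate_string_vcf.py | count_variants_by_filter
-- ===== SOURCE A (Python) =====
-- FILTERS = ["PASS", "FAIL", "OTHER"]
--
-- def count_variants_by_filter(vcf_content: str) -> dict[str, int]:
--     """Count variants by FILTER value."""
--     counts = dict.fromkeys(FILTERS, 0)
--
--     for line in vcf_content.split("\n"):
--         if line.startswith("#") or not line.strip():
--             continue
--         parts = line.split("\t")
--         if len(parts) >= 7: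
--             filt = parts[6]
--             if filt in counts:
--                 counts[filt] += 1
--
--     return counts
-- ===== SOURCE B (Python) =====
-- FILTERS = ["PASS", "FAIL", "OTHER"]
--
-- def _filter_value(line):
--     """Return the FILTER-column value of a valid data line, else None."""
--     if line.startswith("#") or not line.strip():
--         return None
--     parts = line.split("\t")
--     if len(parts) >= 7:
--         return parts[6]
--     return None
--
-- def count_variants_by_filter(vcf_content: str) -> dict[str, int]:
--     """Count variants by FILTER value: one full scan of the lines per filter key."""
--     lines = vcf_content.split("\n")
--     return {f: sum(1 for line in lines if _filter_value(line) == f) for f in FILTERS}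
-- ===== Notes on version B (the rewrite author's own statement) =====
-- stated objective: alternative
-- what changed: B inverts the loop nesting: instead of A's single pass over lines incrementing a pre-initialized dict, B loops over the fixed FILTERS key list and for each key performs a full scan of the lines counting those whose FILTER-column value (computed by a helper) equals that key.
import Mathlib
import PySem

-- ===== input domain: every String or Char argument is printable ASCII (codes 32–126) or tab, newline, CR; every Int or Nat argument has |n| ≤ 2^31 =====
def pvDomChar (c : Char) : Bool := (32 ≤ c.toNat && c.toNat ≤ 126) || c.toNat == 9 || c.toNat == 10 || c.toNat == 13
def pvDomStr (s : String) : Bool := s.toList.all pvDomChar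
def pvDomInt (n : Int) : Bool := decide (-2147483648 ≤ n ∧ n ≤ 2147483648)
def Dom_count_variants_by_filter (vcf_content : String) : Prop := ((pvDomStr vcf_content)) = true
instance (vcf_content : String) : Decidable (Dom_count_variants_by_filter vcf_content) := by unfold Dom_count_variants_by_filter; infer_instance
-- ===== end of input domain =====

-- B inverts the loop nesting: instead of A's single pass updating a pre-initialized dict, B
-- loops over the fixed FILTERS keys, each doing a full scan of the lines (objective: alternative).

-- module constant FILTERS, used by both programs
def FILTERS_cvf : List String := ["PASS", "FAIL", "OTHER"]

-- ===== PORT A =====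
-- per-line body of A's loop
def cvf_step (counts : PySem.Dict String Int) (line : String) : PySem.Dict String Int :=
  if PySem.Str.startswith line "#" = true ∨ PySem.Str.strip line = "" then counts
  else
    let parts := ((PySem.Str.split? line "\t").getD [])
    if 7 ≤ parts.length then
      let filt := parts.getD 6 ""
      if counts.contains filt then counts.insert filt (counts.getD filt 0 + 1) else counts
    else counts

def count_variants_by_filter (vcf_content : String) : List (String × Int) :=
  let counts := PySem.Dict.ofList (FILTERS_cvf.map (fun f => (f, (0 : Int))))
  ((((PySem.Str.split? vcf_content "\n").getD [])).foldl cvf_step counts).items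

-- ===== PORT B =====
-- B's helper _filter_value: the FILTER column of a valid data line, else none
def cvf_fv (line : String) : Option String :=
  if PySem.Str.startswith line "#" = true ∨ PySem.Str.strip line = "" then none
  else
    let parts := ((PySem.Str.split? line "\t").getD [])
    if 7 ≤ parts.length then some (parts.getD 6 "") else none

def count_variants_by_filter_alt (vcf_content : String) : List (String × Int) :=
  let lines := ((PySem.Str.split? vcf_content "\n").getD [])
  FILTERS_cvf.map (fun f => (f, (lines.countP (fun l => cvf_fv l == some f) : Int)))

-- ===== PRECONDITION & SPEC =====
def Spec_count_variants_by_filter (vcf_content : String) (out : List (String × Int)) : Prop := out = count_variants_by_filter_alt vcf_content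
instance (vcf_content : String) (out : List (String × Int)) : Decidable (Spec_count_variants_by_filter vcf_content out) := by unfold Spec_count_variants_by_filter; infer_instance

-- ===== CLAIM (what is proved, stated in full; the proofs are below) =====
def Claim_equal_count_variants_by_filter : Prop := ∀ (vcf_content : String), Dom_count_variants_by_filter vcf_content → Spec_count_variants_by_filter vcf_content (count_variants_by_filter vcf_content)

-- ===== LEMMAS AND PROOFS =====

-- loop invariant: folding A's step over any line list, starting from the three-key dict with
-- values a, b, c, adds to each key exactly the number of lines whose FILTER value is that key
lemma cvf_key (lines : List String) (a b c : Int) :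
    (lines.foldl cvf_step (PySem.Dict.mk [("PASS", a), ("FAIL", b), ("OTHER", c)])).items
    = [("PASS", a + (lines.countP (fun l => cvf_fv l == some "PASS") : Int)),
       ("FAIL", b + (lines.countP (fun l => cvf_fv l == some "FAIL") : Int)),
       ("OTHER", c + (lines.countP (fun l => cvf_fv l == some "OTHER") : Int))] := by
  induction lines generalizing a b c with
  | nil => simp
  | cons l ls ih =>
    simp only [List.foldl_cons, List.countP_cons]
    by_cases hskip : PySem.Str.startswith l "#" = true ∨ PySem.Str.strip l = ""
    · rw [show cvf_step (PySem.Dict.mk [("PASS", a), ("FAIL", b), ("OTHER", c)]) l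
            = PySem.Dict.mk [("PASS", a), ("FAIL", b), ("OTHER", c)] from by
        simp only [cvf_step]; rw [if_pos hskip]]
      have hfv : cvf_fv l = none := by simp only [cvf_fv]; rw [if_pos hskip]
      rw [ih a b c]
      simp [hfv]
    · by_cases hlen : 7 ≤ (((PySem.Str.split? l "\t").getD [])).length
      · set filt := (((PySem.Str.split? l "\t").getD [])).getD 6 "" with hfilt
        have hfv : cvf_fv l = some filt := by
          simp only [cvf_fv]; rw [if_neg hskip, if_pos hlen]
        have hstep : cvf_step (PySem.Dict.mk [("PASS", a), ("FAIL", b), ("OTHER", c)]) l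
            = if (PySem.Dict.mk [("PASS", a), ("FAIL", b), ("OTHER", c)]).contains filt = true
              then (PySem.Dict.mk [("PASS", a), ("FAIL", b), ("OTHER", c)]).insert filt
                     ((PySem.Dict.mk [("PASS", a), ("FAIL", b), ("OTHER", c)]).getD filt 0 + 1)
              else PySem.Dict.mk [("PASS", a), ("FAIL", b), ("OTHER", c)] := by
          simp only [cvf_step]; rw [if_neg hskip, if_pos hlen]
        by_cases hP : filt = "PASS"
        · rw [hstep, hP]
          rw [if_pos (show (PySem.Dict.mk [("PASS", a), ("FAIL", b), ("OTHER", c)]).contains "PASS" = true from rfl)]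
          rw [show ((PySem.Dict.mk [("PASS", a), ("FAIL", b), ("OTHER", c)]).insert "PASS"
                ((PySem.Dict.mk [("PASS", a), ("FAIL", b), ("OTHER", c)]).getD "PASS" 0 + 1))
              = PySem.Dict.mk [("PASS", a + 1), ("FAIL", b), ("OTHER", c)] from rfl]
          rw [ih (a + 1) b c]
          simp [hfv, hP]
          omega
        · by_cases hF : filt = "FAIL"
          · rw [hstep, hF]
            rw [if_pos (show (PySem.Dict.mk [("PASS", a), ("FAIL", b), ("OTHER", c)]).contains "FAIL" = true from rfl)]
            rw [show ((PySem.Dict.mk [("PASS", a), ("FAIL", b), ("OTHER", c)]).insert "FAIL"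
                  ((PySem.Dict.mk [("PASS", a), ("FAIL", b), ("OTHER", c)]).getD "FAIL" 0 + 1))
                = PySem.Dict.mk [("PASS", a), ("FAIL", b + 1), ("OTHER", c)] from rfl]
            rw [ih a (b + 1) c]
            simp [hfv, hF]
            omega
          · by_cases hO : filt = "OTHER"
            · rw [hstep, hO]
              rw [if_pos (show (PySem.Dict.mk [("PASS", a), ("FAIL", b), ("OTHER", c)]).contains "OTHER" = true from rfl)]
              rw [show ((PySem.Dict.mk [("PASS", a), ("FAIL", b), ("OTHER", c)]).insert "OTHER"
                    ((PySem.Dict.mk [("PASS", a), ("FAIL", b), ("OTHER", c)]).getD "OTHER" 0 + 1))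
                  = PySem.Dict.mk [("PASS", a), ("FAIL", b), ("OTHER", c + 1)] from rfl]
              rw [ih a b (c + 1)]
              simp [hfv, hO]
              omega
            · rw [hstep]
              rw [if_neg (show ¬ (PySem.Dict.mk [("PASS", a), ("FAIL", b), ("OTHER", c)]).contains filt = true from by
                simp
                exact ⟨fun h => hP h.symm, fun h => hF h.symm, fun h => hO h.symm⟩)]
              rw [ih a b c]
              simp [hfv, hP, hF, hO]
      · rw [show cvf_step (PySem.Dict.mk [("PASS", a), ("FAIL", b), ("OTHER", c)]) l
              = PySem.Dict.mk [("PASS", a), ("FAIL", b), ("OTHER", c)] from by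
          simp only [cvf_step]; rw [if_neg hskip, if_neg hlen]]
        have hfv : cvf_fv l = none := by
          simp only [cvf_fv]; rw [if_neg hskip, if_neg hlen]
        rw [ih a b c]
        simp [hfv]

-- ===== VERDICT (by name: the statement is the Claim_ definition above) =====
theorem count_variants_by_filter_spec : Claim_equal_count_variants_by_filter := by
  intro s _
  show _ = _
  unfold count_variants_by_filter count_variants_by_filter_alt
  have hinit : PySem.Dict.ofList (FILTERS_cvf.map (fun f => (f, (0 : Int))))
      = PySem.Dict.mk [("PASS", 0), ("FAIL", 0), ("OTHER", 0)] := by decide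
  rw [hinit, cvf_key]
  simp [FILTERS_cvf]
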